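-- pv_equiv track=rewrite | github.com/ClanClanClanClan/math-pdf-manager | src/arxivbot/models/cmo.py | _build_with_max_authors
-- ===== SOURCE A (Python) =====
-- from typing import Any, Dict, Iterable, List, Optional, Set
--
-- def _build_with_max_authors(
--     all_segments: List[str], title_part: str, max_bytes: int
-- ) -> str:
--     """Include as many authors as possible, using 'et al.' when truncated."""
--     n = len(all_segments)
--     et_al = ", et al."
--
--     full = ", ".join(all_segments) + title_part
--     if len(full.encode("utf-8")) <= max_bytes:
--         return full
--
--     lo, hi, best_k = 1, n - 1, 1
--     while lo <= hi:
--         mid = (lo + hi) // 2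
--         candidate = ", ".join(all_segments[:mid]) + et_al + title_part
--         if len(candidate.encode("utf-8")) <= max_bytes:
--             best_k = mid
--             lo = mid + 1
--         else:
--             hi = mid - 1
--
--     return ", ".join(all_segments[:best_k]) + et_al + title_part
-- ===== SOURCE B (Python) =====
-- def _build_with_max_authors(all_segments, title_part, max_bytes):
--     """Prefix-sum arithmetic over byte lengths in one linear pass, instead of
--     re-joining string candidates inside a binary search."""
--     n = len(all_segments)
--     et_al = ", et al."
--     lens = [len(s.encode("utf-8")) for s in all_segments]
--     title_len = len(title_part.encode("utf-8"))
--     total = sum(lens) + 2 * max(n - 1, 0) + title_len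
--     if total <= max_bytes:
--         return ", ".join(all_segments) + title_part
--     base = len(et_al.encode("utf-8")) + title_len
--     best_k, k, acc = 1, 1, 0
--     for L in lens[:-1]:
--         acc += L
--         if acc + 2 * (k - 1) + base <= max_bytes:
--             best_k = k
--         else:
--             break
--         k += 1
--     return ", ".join(all_segments[:best_k]) + et_al + title_part
-- ===== Notes on version B (the rewrite author's own statement) =====
-- stated objective: alternative
-- what changed: Replaces the binary search that re-joins a full candidate author string at every probe with precomputed per-segment byte lengths and a single linear prefix-sum scan whose fit test is O(1) arithmetic.
import Mathlib
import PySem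

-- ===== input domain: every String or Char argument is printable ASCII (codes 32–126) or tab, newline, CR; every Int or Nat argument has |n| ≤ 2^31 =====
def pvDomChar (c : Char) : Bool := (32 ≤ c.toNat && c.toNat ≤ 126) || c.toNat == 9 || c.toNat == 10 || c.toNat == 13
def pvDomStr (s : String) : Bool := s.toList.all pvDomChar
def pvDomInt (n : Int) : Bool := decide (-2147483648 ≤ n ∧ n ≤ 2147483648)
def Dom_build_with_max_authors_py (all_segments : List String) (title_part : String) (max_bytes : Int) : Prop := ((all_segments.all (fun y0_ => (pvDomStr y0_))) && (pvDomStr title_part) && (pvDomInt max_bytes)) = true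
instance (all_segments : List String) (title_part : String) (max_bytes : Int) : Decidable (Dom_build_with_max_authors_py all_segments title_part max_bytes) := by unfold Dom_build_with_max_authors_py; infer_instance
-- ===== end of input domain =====

-- B replaces A's binary search (which re-joins a candidate author string at every probe) by
-- per-segment lengths and one linear prefix-sum scan with arithmetic fit tests (alternative
-- algorithm, same observable result).
-- (On the ASCII Dom the UTF-8 byte length the Python code measures equals the code-point
-- count PySem.Str.len, so both ports measure lengths with PySem.Str.len.)

-- ===== PORT A =====
-- the while-loop of A, state (lo, hi, best_k)
def pyAloop (all_segments : List String) (title_part : String) (max_bytes : Int)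
    (lo hi best : Int) : Int :=
  if h : lo ≤ hi then
    let mid := PySem.Int.floordiv (lo + hi) 2
    let candidate := PySem.Str.join ", " (PySem.List.slice all_segments none (some mid)) ++ ", et al." ++ title_part
    if PySem.Str.len candidate ≤ max_bytes then
      pyAloop all_segments title_part max_bytes (mid + 1) hi mid
    else
      pyAloop all_segments title_part max_bytes lo (mid - 1) best
  else best
termination_by (hi + 1 - lo).toNat
decreasing_by
  · have := PySem.Int.floordiv_two_mid_bounds h; omega
  · have := PySem.Int.floordiv_two_mid_bounds h; omega

def build_with_max_authors_py (all_segments : List String) (title_part : String) (max_bytes : Int) : String :=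
  let n : Int := all_segments.length
  let full := PySem.Str.join ", " all_segments ++ title_part
  if PySem.Str.len full ≤ max_bytes then full
  else
    let best_k := pyAloop all_segments title_part max_bytes 1 (n - 1) 1
    PySem.Str.join ", " (PySem.List.slice all_segments none (some best_k)) ++ ", et al." ++ title_part

-- ===== PORT B =====
-- the for-loop of B: scan lens[:-1] with counter k, prefix sum acc and best_k; break on first misfit
def pyBloop (max_bytes base : Int) : List Int → Int → Int → Int → Int
  | [], _, _, best => best
  | L :: rest, k, acc, best =>
    let acc' := acc + L
    if acc' + 2 * (k - 1) + base ≤ max_bytes then pyBloop max_bytes base rest (k + 1) acc' k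
    else best

def build_with_max_authors_py_alt (all_segments : List String) (title_part : String) (max_bytes : Int) : String :=
  let n : Int := all_segments.length
  let lens := all_segments.map PySem.Str.len
  let title_len := PySem.Str.len title_part
  let total := lens.sum + 2 * max (n - 1) 0 + title_len
  if total ≤ max_bytes then PySem.Str.join ", " all_segments ++ title_part
  else
    let base := PySem.Str.len ", et al." + title_len
    let best_k := pyBloop max_bytes base (PySem.List.slice lens none (some (-1))) 1 0 1
    PySem.Str.join ", " (PySem.List.slice all_segments none (some best_k)) ++ ", et al." ++ title_part

-- ===== PRECONDITION & SPEC =====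
def Spec_build_with_max_authors_py (all_segments : List String) (title_part : String) (max_bytes : Int) (out : String) : Prop := out = build_with_max_authors_py_alt all_segments title_part max_bytes
instance (all_segments : List String) (title_part : String) (max_bytes : Int) (out : String) : Decidable (Spec_build_with_max_authors_py all_segments title_part max_bytes out) := by unfold Spec_build_with_max_authors_py; infer_instance

-- ===== CLAIM (what is proved, stated in full; the proofs are below) =====
def Claim_equal_build_with_max_authors_py : Prop := ∀ (all_segments : List String) (title_part : String) (max_bytes : Int), Dom_build_with_max_authors_py all_segments title_part max_bytes → Spec_build_with_max_authors_py all_segments title_part max_bytes (build_with_max_authors_py all_segments title_part max_bytes)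

-- ===== LEMMAS AND PROOFS =====

-- total length of the first k segments
def pvS (segs : List String) (k : Nat) : Int := ((segs.take k).map PySem.Str.len).sum

-- "a truncated candidate with k authors fits in maxb"
def pvFit (segs : List String) (title : String) (maxb : Int) (k : Int) : Prop :=
  pvS segs k.toNat + 2 * (k - 1) + 8 + PySem.Str.len title ≤ maxb

-- characterisation of the best_k both loops compute
def pvC (segs : List String) (title : String) (maxb : Int) (r : Int) : Prop :=
  (r = 1 ∧ ((segs.length : Int) - 1 < 1 ∨ ¬ pvFit segs title maxb 1)) ∨
  (1 ≤ r ∧ r ≤ (segs.length : Int) - 1 ∧ pvFit segs title maxb r ∧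
    ((segs.length : Int) - 1 ≤ r ∨ ¬ pvFit segs title maxb (r + 1)))

lemma pvLen_nonneg (s : String) : 0 ≤ PySem.Str.len s := by
  rw [PySem.Str.len_eq]; exact_mod_cast Nat.zero_le _

lemma pvJoinLen (sep : List Char) (p : List Char) (ps : List (List Char)) :
    (PySem.Chars.join sep (p :: ps)).length
      = p.length + (ps.map (fun q => sep.length + q.length)).sum := by
  induction ps generalizing p with
  | nil => simp [PySem.Chars.join_singleton]
  | cons q rest ih =>
      rw [PySem.Chars.join_cons_cons]
      simp [ih q]; omega

lemma pvLenFun : PySem.Str.len = fun s => ((s.toList.length : Nat) : Int) :=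
  funext PySem.Str.len_eq

lemma pvSumAux (ps : List String) :
    ((((ps.map String.toList).map (fun q => 2 + q.length)).sum : Nat) : Int)
      = (ps.map PySem.Str.len).sum + 2 * ps.length := by
  induction ps with
  | nil => simp
  | cons a t ih =>
      simp only [List.map_cons, List.sum_cons, List.length_cons, pvLenFun] at *
      push_cast at *
      omega

lemma pvJoinLenStr (p : String) (ps : List String) :
    PySem.Str.len (PySem.Str.join ", " (p :: ps))
      = PySem.Str.len p + (ps.map PySem.Str.len).sum + 2 * ps.length := by
  rw [PySem.Str.len_eq, PySem.Str.toList_join, List.map_cons, pvJoinLen]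
  have h2 : (", ".toList).length = 2 := by decide
  rw [h2, Nat.cast_add, pvSumAux, PySem.Str.len_eq p]
  ring

lemma pvFullLen (segs : List String) (title : String) :
    PySem.Str.len (PySem.Str.join ", " segs ++ title)
      = (segs.map PySem.Str.len).sum + 2 * max ((segs.length : Int) - 1) 0 + PySem.Str.len title := by
  cases segs with
  | nil =>
      rw [PySem.Str.len_append]
      simp
  | cons p ps =>
      rw [PySem.Str.len_append, pvJoinLenStr]
      simp only [List.map_cons, List.sum_cons, List.length_cons]
      push_cast
      omega

lemma pvCandLen (segs : List String) (title : String) (k : Nat) (h1 : 1 ≤ k) (h2 : k ≤ segs.length) :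
    PySem.Str.len (PySem.Str.join ", " (segs.take k) ++ ", et al." ++ title)
      = pvS segs k + 2 * ((k : Int) - 1) + 8 + PySem.Str.len title := by
  obtain ⟨p, ps, hp⟩ : ∃ p ps, segs.take k = p :: ps := by
    cases htk : segs.take k with
    | nil => exfalso; have := List.length_take_of_le h2 (l := segs) ▸ congrArg List.length htk; simp at this; omega
    | cons a t => exact ⟨a, t, rfl⟩
  have hlen : ps.length = k - 1 := by
    have := congrArg List.length hp
    rw [List.length_take_of_le h2] at this
    simp at this; omega
  rw [PySem.Str.len_append, PySem.Str.len_append, hp, pvJoinLenStr]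
  have h8 : PySem.Str.len ", et al." = 8 := by decide
  simp only [pvS, hp, List.map_cons, List.sum_cons, h8, hlen]
  have : ((k - 1 : Nat) : Int) = (k : Int) - 1 := by omega
  rw [this]

lemma pvS_succ (segs : List String) (k : Nat) (h : k < segs.length) :
    pvS segs (k + 1) = pvS segs k + PySem.Str.len segs[k] := by
  rw [pvS, pvS, List.take_add_one, List.map_append, List.sum_append, List.getElem?_eq_getElem h]
  simp

lemma pvS_mono (segs : List String) (a b : Nat) (h : a ≤ b) : pvS segs a ≤ pvS segs b := by
  have hb : b = a + (b - a) := by omega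
  rw [hb]; unfold pvS
  rw [List.take_add, List.map_append, List.sum_append]
  have h0 : 0 ≤ (((segs.drop a).take (b - a)).map PySem.Str.len).sum :=
    List.sum_nonneg (by intro x hx; obtain ⟨s, _, rfl⟩ := List.mem_map.mp hx; exact pvLen_nonneg s)
  omega

lemma pvFit_mono (segs : List String) (title : String) (maxb : Int) (j k : Int)
    (h1 : 1 ≤ j) (hjk : j ≤ k) (hf : pvFit segs title maxb k) : pvFit segs title maxb j := by
  unfold pvFit at *
  have hs := pvS_mono segs j.toNat k.toNat (by omega)
  omega

lemma pvC_not_lt (segs : List String) (title : String) (maxb : Int) (r1 r2 : Int)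
    (h1 : pvC segs title maxb r1) (h2 : pvC segs title maxb r2) : ¬ r1 < r2 := by
  intro hlt
  rcases h2 with ⟨hr2, _⟩ | ⟨hr2a, hr2b, hr2c, _⟩
  · rcases h1 with ⟨hr1, _⟩ | ⟨hr1a, _⟩ <;> omega
  · rcases h1 with ⟨hr1, hcase⟩ | ⟨hr1a, hr1b, _, hcase⟩
    · rcases hcase with hn | hnf
      · omega
      · exact hnf (pvFit_mono segs title maxb 1 r2 le_rfl (by omega) hr2c)
    · rcases hcase with hn | hnf
      · omega
      · exact hnf (pvFit_mono segs title maxb (r1 + 1) r2 (by omega) (by omega) hr2c)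

lemma pvC_unique (segs : List String) (title : String) (maxb : Int) (r1 r2 : Int)
    (h1 : pvC segs title maxb r1) (h2 : pvC segs title maxb r2) : r1 = r2 := by
  rcases lt_trichotomy r1 r2 with h | h | h
  · exact absurd h (pvC_not_lt segs title maxb r1 r2 h1 h2)
  · exact h
  · exact absurd h (pvC_not_lt segs title maxb r2 r1 h2 h1)

lemma pvExit (segs : List String) (title : String) (maxb : Int) (lo hi best : Int)
    (hlt : hi < lo)
    (hinv : (lo = 1 ∧ best = 1) ∨ (best = lo - 1 ∧ 1 ≤ best ∧ best ≤ (segs.length : Int) - 1 ∧ pvFit segs title maxb best))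
    (hinv2 : ∀ k : Int, hi < k → k ≤ (segs.length : Int) - 1 → ¬ pvFit segs title maxb k) :
    pvC segs title maxb best := by
  rcases hinv with ⟨hl1, hb1⟩ | ⟨hb, hb1, hb2, hbf⟩
  · left
    refine ⟨hb1, ?_⟩
    by_cases hn : (segs.length : Int) - 1 < 1
    · exact Or.inl hn
    · exact Or.inr (hinv2 1 (by omega) (by omega))
  · right
    refine ⟨hb1, hb2, hbf, ?_⟩
    by_cases hn : (segs.length : Int) - 1 ≤ best
    · exact Or.inl hn
    · exact Or.inr (hinv2 (best + 1) (by omega) (by omega))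

lemma pvAloop_char (segs : List String) (title : String) (maxb : Int) :
    ∀ (F : Nat) (lo hi best : Int), (hi + 1 - lo).toNat ≤ F →
    1 ≤ lo → hi ≤ (segs.length : Int) - 1 →
    ((lo = 1 ∧ best = 1) ∨ (best = lo - 1 ∧ 1 ≤ best ∧ best ≤ (segs.length : Int) - 1 ∧ pvFit segs title maxb best)) →
    (∀ k : Int, hi < k → k ≤ (segs.length : Int) - 1 → ¬ pvFit segs title maxb k) →
    pvC segs title maxb (pyAloop segs title maxb lo hi best) := by
  intro F
  induction F with
  | zero =>
      intro lo hi best hF h1 h3 hinv hinv2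
      have hexit : ¬ lo ≤ hi := by omega
      rw [pyAloop, dif_neg hexit]
      exact pvExit segs title maxb lo hi best (by omega) hinv hinv2
  | succ F ih =>
      intro lo hi best hF h1 h3 hinv hinv2
      by_cases h : lo ≤ hi
      · rw [pyAloop, dif_pos h]
        have hmid := PySem.Int.floordiv_two_mid_bounds h
        set mid := PySem.Int.floordiv (lo + hi) 2 with hmiddef
        have hslice : PySem.List.slice segs none (some mid) = segs.take mid.toNat := by
          have hm : (some mid) = some ((mid.toNat : Nat) : Int) := by congr 1; omega
          rw [hm, PySem.List.slice_to_natCast]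
        have hcl : PySem.Str.len (PySem.Str.join ", " (PySem.List.slice segs none (some mid)) ++ ", et al." ++ title)
            = pvS segs mid.toNat + 2 * (mid - 1) + 8 + PySem.Str.len title := by
          rw [hslice, pvCandLen segs title mid.toNat (by omega) (by omega)]
          have hmm : ((mid.toNat : Nat) : Int) = mid := by omega
          rw [hmm]
        simp only [hcl]
        split_ifs with hc
        · exact ih (mid + 1) hi mid (by omega) (by omega) h3
            (Or.inr ⟨by ring, by omega, by omega, hc⟩) hinv2
        · refine ih lo (mid - 1) best (by omega) (by omega) (by omega) hinv ?_
          intro k hk1 hk2 hfk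
          by_cases hkh : k ≤ hi
          · exact hc (pvFit_mono segs title maxb mid k (by omega) (by omega) hfk)
          · exact hinv2 k (by omega) hk2 hfk
      · rw [pyAloop, dif_neg h]
        exact pvExit segs title maxb lo hi best (by omega) hinv hinv2

lemma pvBloop_char (segs : List String) (title : String) (maxb : Int) :
    ∀ (rest : List Int) (m : Nat) (k acc best : Int),
    rest = ((segs.map PySem.Str.len).dropLast).drop m →
    k = (m : Int) + 1 → acc = pvS segs m →
    ((k = 1 ∧ best = 1) ∨ (best = k - 1 ∧ 1 ≤ best ∧ best ≤ (segs.length : Int) - 1 ∧ pvFit segs title maxb best)) →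
    pvC segs title maxb (pyBloop maxb (8 + PySem.Str.len title) rest k acc best) := by
  intro rest
  induction rest with
  | nil =>
      intro m k acc best hrest hk hacc hinv
      have hlen : segs.length - 1 ≤ m := by
        have := congrArg List.length hrest
        simp [List.length_dropLast, List.length_map] at this
        omega
      simp only [pyBloop]
      rcases hinv with ⟨hk1, hb1⟩ | ⟨hb, hb1, hb2, hbf⟩
      · left
        refine ⟨hb1, Or.inl ?_⟩
        have : m = 0 := by omega
        omega
      · right
        refine ⟨hb1, hb2, hbf, Or.inl ?_⟩
        omega
  | cons L rest' ih =>
      intro m k acc best hrest hk hacc hinv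
      have hm : m < segs.length - 1 ∧ m < (segs.map PySem.Str.len).dropLast.length := by
        have := congrArg List.length hrest
        simp [List.length_dropLast, List.length_map] at this ⊢
        omega
      have hL : L = PySem.Str.len (segs[m]'(by omega)) := by
        have h0 : ((segs.map PySem.Str.len).dropLast.drop m)[0]'(by rw [← hrest]; simp) = L := by
          simp [← hrest]
        rw [List.getElem_drop] at h0
        rw [List.getElem_dropLast, List.getElem_map] at h0
        simpa using h0.symm
      have hsucc : acc + L = pvS segs (m + 1) := by
        rw [hacc, pvS_succ segs m (by omega), hL]
      have hcondeq : (acc + L + 2 * (k - 1) + (8 + PySem.Str.len title) ≤ maxb) ↔ pvFit segs title maxb k := by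
        unfold pvFit
        rw [hsucc, hk]
        have ht : (((m : Int) + 1)).toNat = m + 1 := by omega
        rw [ht]
        constructor <;> intro hh <;> linarith
      simp only [pyBloop]
      split_ifs with hc
      · have hdrop : rest' = ((segs.map PySem.Str.len).dropLast).drop (m + 1) := by
          rw [← List.drop_drop, ← hrest, List.drop_one, List.tail_cons]
        exact ih (m + 1) (k + 1) (acc + L) k hdrop (by push_cast; omega) hsucc
          (Or.inr ⟨by ring, by omega, by omega, hcondeq.mp hc⟩)
      · have hnf : ¬ pvFit segs title maxb k := fun hfk => hc (hcondeq.mpr hfk)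
        rcases hinv with ⟨hk1, hb1⟩ | ⟨hb, hb1, hb2, hbf⟩
        · left
          exact ⟨hb1, Or.inr (by rw [← hk1]; exact hnf)⟩
        · right
          refine ⟨hb1, hb2, hbf, Or.inr ?_⟩
          rw [show best + 1 = k by omega]
          exact hnf

-- ===== VERDICT (by name: the statement is the Claim_ definition above) =====
theorem build_with_max_authors_py_spec : Claim_equal_build_with_max_authors_py := by
  intro segs title maxb _
  unfold Spec_build_with_max_authors_py
  simp only [build_with_max_authors_py, build_with_max_authors_py_alt]
  rw [pvFullLen]
  split_ifs with hc
  · rfl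
  · have h8 : PySem.Str.len ", et al." = 8 := by decide
    rw [h8, PySem.List.slice_to_neg_one]
    have hA := pvAloop_char segs title maxb ((segs.length : Int) - 1 + 1 - 1).toNat 1 ((segs.length : Int) - 1) 1
      (le_refl _) (by omega) (le_refl _) (Or.inl ⟨rfl, rfl⟩)
      (by intro k hk1 hk2 hf; exact absurd hk2 (by omega))
    have hB := pvBloop_char segs title maxb ((segs.map PySem.Str.len).dropLast) 0 1 0 1
      (by simp) (by norm_num) (by simp [pvS]) (Or.inl ⟨rfl, rfl⟩)
    rw [pvC_unique segs title maxb _ _ hA hB]
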